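-- pv_equiv track=rewrite | github.com/JackieMaw/AdventOfCode | python/2019day01b.py | fuel_required
-- ===== SOURCE A (Python) =====
-- import math
--
-- def fuel_required(mass):
--     fuel_for_mass = math.floor(mass / 3) - 2
--     print (f"mass: {mass} => fuel_for_mass: {fuel_for_mass}")
--     if (fuel_for_mass > 0):
--         fuel_for_fuel = fuel_required(fuel_for_mass)
--         print (f"fuel: {fuel_for_mass} => fuel_for_fuel: {fuel_for_fuel}")
--         return fuel_for_mass + fuel_for_fuel
--     else:
--         return 0
-- ===== SOURCE B (Python) =====
-- import math
--
-- def fuel_required(mass):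
--     # iterative re-implementation: first pass collects each fuel step,
--     # second pass replays the "fuel_for_fuel" prints and sums with an accumulator
--     fuels = []
--     m = mass
--     while True:
--         f = math.floor(m / 3) - 2
--         print(f"mass: {m} => fuel_for_mass: {f}")
--         if f > 0:
--             fuels.append(f)
--             m = f
--         else:
--             break
--     total = 0
--     for f in reversed(fuels):
--         print(f"fuel: {f} => fuel_for_fuel: {total}")
--         total += f
--     return total
-- ===== Notes on version B (the rewrite author's own statement) =====
-- stated objective: alternative
-- what changed: Replaces A's recursion (f + fuel_required(f)) by a two-pass iteration: a loop collecting the chain of fuel values into a list, then a reverse fold with an accumulator that sums them (printing the same lines).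
import Mathlib
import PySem

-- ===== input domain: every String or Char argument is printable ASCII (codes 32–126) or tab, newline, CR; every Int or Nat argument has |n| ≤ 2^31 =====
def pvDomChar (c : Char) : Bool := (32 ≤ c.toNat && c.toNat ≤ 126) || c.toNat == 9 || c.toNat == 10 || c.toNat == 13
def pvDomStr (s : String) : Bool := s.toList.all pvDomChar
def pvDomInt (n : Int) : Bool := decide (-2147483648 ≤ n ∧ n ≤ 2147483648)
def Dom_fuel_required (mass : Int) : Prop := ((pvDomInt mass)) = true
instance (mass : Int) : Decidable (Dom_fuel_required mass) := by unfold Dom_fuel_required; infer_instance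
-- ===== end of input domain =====

-- B replaces A's recursion by an iterative accumulator loop (same return value; both
-- programs also print identical progress lines, a side effect not modelled here).

-- termination helper: the next fuel value is smaller (cited by both ports' decreasing_by)
theorem pv_fuel_decr (m : Int) (h : PySem.Int.floordiv m 3 - 2 > 0) :
    (PySem.Int.floordiv m 3 - 2).toNat < m.toNat := by
  have h3 : (0:Int) < 3 := by norm_num
  rw [PySem.Int.floordiv_eq_ediv_of_pos h3] at h ⊢
  omega

-- ===== PORT A =====
-- recursive, exactly A's structure (print statements have no return-value effect)
def fuel_required (mass : Int) : Int :=
  let fuel_for_mass := PySem.Int.floordiv mass 3 - 2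
  if h : fuel_for_mass > 0 then
    let fuel_for_fuel := fuel_required fuel_for_mass
    fuel_for_mass + fuel_for_fuel
  else
    0
termination_by mass.toNat
decreasing_by exact pv_fuel_decr mass h

-- ===== PORT B =====
-- first pass of Source B: collect successive fuel values into a list
def fuelChain (m : Int) : List Int :=
  let f := PySem.Int.floordiv m 3 - 2
  if h : f > 0 then f :: fuelChain f else []
termination_by m.toNat
decreasing_by exact pv_fuel_decr m h

-- second pass of Source B: fold the reversed list with an accumulator
def fuel_required_alt (mass : Int) : Int :=
  (fuelChain mass).reverse.foldl (fun total f => total + f) 0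

-- ===== PRECONDITION & SPEC =====
def Spec_fuel_required (mass : Int) (out : Int) : Prop := out = fuel_required_alt mass
instance (mass : Int) (out : Int) : Decidable (Spec_fuel_required mass out) := by unfold Spec_fuel_required; infer_instance

-- ===== CLAIM (what is proved, stated in full; the proofs are below) =====
def Claim_equal_fuel_required : Prop := ∀ (mass : Int), Dom_fuel_required mass → Spec_fuel_required mass (fuel_required mass)

-- ===== LEMMAS AND PROOFS =====
theorem pv_sum_chain (m : Int) : (fuelChain m).sum = fuel_required m := by
  induction m using fuelChain.induct with
  | case1 m f hf ih =>
    rw [fuelChain, fuel_required]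
    rw [dif_pos hf, dif_pos hf]
    simp only [List.sum_cons]
    exact congrArg (_ + ·) ih
  | case2 m f hf =>
    rw [fuelChain, fuel_required]
    rw [dif_neg hf, dif_neg hf]
    simp

theorem pv_alt_eq (mass : Int) : fuel_required_alt mass = fuel_required mass := by
  rw [fuel_required_alt, ← pv_sum_chain]
  have : ∀ (l : List Int) (acc : Int), l.foldl (fun total f => total + f) acc = acc + l.sum := by
    intro l; induction l with
    | nil => simp
    | cons x xs ih => intro acc; simp [ih, add_assoc]
  rw [this, List.sum_reverse]; ring

-- ===== VERDICT (by name: the statement is the Claim_ definition above) =====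
theorem fuel_required_spec : Claim_equal_fuel_required := by
  intro mass _
  unfold Spec_fuel_required
  rw [pv_alt_eq]
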